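-- pv_equiv track=rewrite | github.com/huubexel/networkx | Assignment2/main.py | emotion_checker
-- ===== SOURCE A (Python) =====
-- def emotion_checker(self_inter, other_inter, positive_emotions, negative_emotions):
--     same_emotion_counter = 0
--     other_emotion_counter = 0
--     last_emotion = ""
--
--     for self_w, other_w in zip(self_inter, other_inter):
--         if self_w in negative_emotions:
--             last_emotion = "negative"
--         elif self_w in positive_emotions:
--             last_emotion = "positive"
--
--         if last_emotion == "negative":
--             if other_w.lower() in negative_emotions:
--                 same_emotion_counter += 1
--             elif other_w.lower() in positive_emotions:
--                 other_emotion_counter += 1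
--         elif last_emotion == "positive":
--             if other_w.lower() in positive_emotions:
--                 same_emotion_counter += 1
--             elif other_w.lower() in negative_emotions:
--                 other_emotion_counter += 1
--
--     return other_emotion_counter, same_emotion_counter
-- ===== SOURCE B (Python) =====
-- def emotion_checker(self_inter, other_inter, positive_emotions, negative_emotions):
--     # Pass 1: forward-fill the prevailing emotion context from self's words.
--     n = min(len(self_inter), len(other_inter))
--     contexts = []
--     last = ""
--     for w in self_inter[:n]:
--         if w in negative_emotions:
--             last = "negative"
--         elif w in positive_emotions:
--             last = "positive"
--         contexts.append(last)
--     # Pass 2: score other's words against the stored context.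
--     other_emotion_counter = 0
--     same_emotion_counter = 0
--     for ctx, w in zip(contexts, other_inter):
--         lw = w.lower()
--         if ctx == "negative":
--             if lw in negative_emotions:
--                 same_emotion_counter += 1
--             elif lw in positive_emotions:
--                 other_emotion_counter += 1
--         elif ctx == "positive":
--             if lw in positive_emotions:
--                 same_emotion_counter += 1
--             elif lw in negative_emotions:
--                 other_emotion_counter += 1
--     return other_emotion_counter, same_emotion_counter
-- ===== Notes on version B (the rewrite author's own statement) =====
-- stated objective: alternative
-- what changed: Replaces A's single stateful loop by two passes: a forward-fill scan that materialises the prevailing emotion context per position, then a separate counting pass over the context/other-word pairs.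
import Mathlib
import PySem

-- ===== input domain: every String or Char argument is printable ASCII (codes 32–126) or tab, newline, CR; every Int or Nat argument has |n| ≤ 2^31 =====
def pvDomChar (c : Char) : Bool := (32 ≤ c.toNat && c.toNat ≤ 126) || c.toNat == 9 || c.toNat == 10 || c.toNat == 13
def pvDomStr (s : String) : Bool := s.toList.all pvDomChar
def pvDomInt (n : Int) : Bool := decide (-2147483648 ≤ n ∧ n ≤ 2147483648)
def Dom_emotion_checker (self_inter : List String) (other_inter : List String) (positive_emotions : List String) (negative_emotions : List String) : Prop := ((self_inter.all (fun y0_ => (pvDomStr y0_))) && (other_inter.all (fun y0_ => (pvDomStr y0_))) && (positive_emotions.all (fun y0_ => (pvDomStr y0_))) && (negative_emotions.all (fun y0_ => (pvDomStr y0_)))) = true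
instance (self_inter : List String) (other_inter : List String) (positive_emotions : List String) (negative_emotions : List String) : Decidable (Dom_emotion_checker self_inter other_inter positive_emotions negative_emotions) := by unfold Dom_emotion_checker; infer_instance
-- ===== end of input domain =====

-- B restructures A's single stateful loop into two passes (forward-fill contexts, then count); same cost, alternative decomposition.

-- ===== PORT A =====
-- one loop over zip(self_inter, other_inter) carrying (same, other, last_emotion)
def echkA_loop (pos neg : List String) : List (String × String) → Int → Int → String → Int × Int
  | [], same, other, _ => (other, same)
  | (sw, ow) :: rest, same, other, last =>
    let last' := if neg.contains sw then "negative"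
                 else if pos.contains sw then "positive" else last
    if last' == "negative" then
      (if neg.contains (PySem.Str.lower ow) then echkA_loop pos neg rest (same + 1) other last'
       else if pos.contains (PySem.Str.lower ow) then echkA_loop pos neg rest same (other + 1) last'
       else echkA_loop pos neg rest same other last')
    else if last' == "positive" then
      (if pos.contains (PySem.Str.lower ow) then echkA_loop pos neg rest (same + 1) other last'
       else if neg.contains (PySem.Str.lower ow) then echkA_loop pos neg rest same (other + 1) last'
       else echkA_loop pos neg rest same other last')
    else echkA_loop pos neg rest same other last'

def emotion_checker (self_inter : List String) (other_inter : List String) (positive_emotions : List String) (negative_emotions : List String) : Int × Int :=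
  echkA_loop positive_emotions negative_emotions (self_inter.zip other_inter) 0 0 ""

-- ===== PORT B =====
-- pass 1: forward-fill scan producing the prevailing context at each position
def echkB_ctx (pos neg : List String) (last : String) : List String → List String
  | [] => []
  | w :: ws =>
    let last' := if neg.contains w then "negative"
                 else if pos.contains w then "positive" else last
    last' :: echkB_ctx pos neg last' ws

-- pass 2: count over context/other-word pairs, accumulating (other, same)
def echkB_count (pos neg : List String) : List (String × String) → Int → Int → Int × Int
  | [], other, same => (other, same)
  | (ctx, w) :: rest, other, same =>
    if ctx == "negative" then
      (if neg.contains (PySem.Str.lower w) then echkB_count pos neg rest other (same + 1)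
       else if pos.contains (PySem.Str.lower w) then echkB_count pos neg rest (other + 1) same
       else echkB_count pos neg rest other same)
    else if ctx == "positive" then
      (if pos.contains (PySem.Str.lower w) then echkB_count pos neg rest other (same + 1)
       else if neg.contains (PySem.Str.lower w) then echkB_count pos neg rest (other + 1) same
       else echkB_count pos neg rest other same)
    else echkB_count pos neg rest other same

def emotion_checker_alt (self_inter : List String) (other_inter : List String) (positive_emotions : List String) (negative_emotions : List String) : Int × Int :=
  let n := min self_inter.length other_inter.length
  echkB_count positive_emotions negative_emotions
    ((echkB_ctx positive_emotions negative_emotions "" (self_inter.take n)).zip other_inter) 0 0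

-- ===== PRECONDITION & SPEC =====
def Spec_emotion_checker (self_inter : List String) (other_inter : List String) (positive_emotions : List String) (negative_emotions : List String) (out : Int × Int) : Prop := out = emotion_checker_alt self_inter other_inter positive_emotions negative_emotions
instance (self_inter : List String) (other_inter : List String) (positive_emotions : List String) (negative_emotions : List String) (out : Int × Int) : Decidable (Spec_emotion_checker self_inter other_inter positive_emotions negative_emotions out) := by unfold Spec_emotion_checker; infer_instance

-- ===== CLAIM (what is proved, stated in full; the proofs are below) =====
def Claim_equal_emotion_checker : Prop := ∀ (self_inter : List String) (other_inter : List String) (positive_emotions : List String) (negative_emotions : List String), Dom_emotion_checker self_inter other_inter positive_emotions negative_emotions → Spec_emotion_checker self_inter other_inter positive_emotions negative_emotions (emotion_checker self_inter other_inter positive_emotions negative_emotions)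

-- ===== LEMMAS AND PROOFS =====
lemma echk_key (pos neg : List String) :
    ∀ (s o : List String) (last : String) (sm ot : Int),
      echkA_loop pos neg (s.zip o) sm ot last =
        echkB_count pos neg
          ((echkB_ctx pos neg last (s.take (min s.length o.length))).zip o) ot sm := by
  intro s
  induction s with
  | nil => intro o last sm ot; simp [echkA_loop, echkB_ctx, echkB_count]
  | cons w ws ih =>
    intro o last sm ot
    cases o with
    | nil => simp [echkA_loop, echkB_ctx, echkB_count]
    | cons v vs =>
      have hmin : min (w :: ws).length (v :: vs).length = min ws.length vs.length + 1 := by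
        simp [Nat.succ_min_succ]
      rw [hmin]
      simp only [List.take_succ_cons, List.zip_cons_cons, echkA_loop, echkB_ctx, echkB_count]
      split_ifs <;> exact ih vs _ _ _

-- ===== VERDICT (by name: the statement is the Claim_ definition above) =====
theorem emotion_checker_spec : Claim_equal_emotion_checker := by
  intro s o pos neg _
  unfold Spec_emotion_checker emotion_checker emotion_checker_alt
  exact echk_key pos neg s o "" 0 0
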